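-- pv_equiv track=rewrite | github.com/ComputationTime/CCCJuniorPrep | Calvin/ccc 11 j5.py | goodCombo
-- ===== SOURCE A (Python) =====
-- def goodCombo(N,x,l):
--
--
--     digits = []
--     while x > 0:
--         digits.append(x % 10)
--         x = x // 10
--
--     for d in digits:
--         for x in range(0,N-1):
--             if d == l[x]:
--                 if (x+1) not in digits:
--                     return False
--     return True
-- ===== SOURCE B (Python) =====
-- def goodCombo(N, x, l):
--     ds = set()
--     while x > 0:
--         ds.add(x % 10)
--         x //= 10
--     if not ds:
--         return True
--     idx = {}
--     for i in range(N - 1):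
--         idx.setdefault(l[i], []).append(i)
--     for d in ds:
--         for i in idx.get(d, []):
--             if i + 1 not in ds:
--                 return False
--     return True
-- ===== Notes on version B (the rewrite author's own statement) =====
-- stated objective: alternative
-- what changed: B builds an inverted index (dict value -> list of positions) over l[:N-1] once, then for each digit of x looks its positions up in the index and checks each successor position, instead of A's rescan of all N-1 positions for every digit with list membership tests.
-- outside the precondition, e.g. on goodCombo(4, 7, [7, 3]): A returns False, B raises IndexError
import Mathlib
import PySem

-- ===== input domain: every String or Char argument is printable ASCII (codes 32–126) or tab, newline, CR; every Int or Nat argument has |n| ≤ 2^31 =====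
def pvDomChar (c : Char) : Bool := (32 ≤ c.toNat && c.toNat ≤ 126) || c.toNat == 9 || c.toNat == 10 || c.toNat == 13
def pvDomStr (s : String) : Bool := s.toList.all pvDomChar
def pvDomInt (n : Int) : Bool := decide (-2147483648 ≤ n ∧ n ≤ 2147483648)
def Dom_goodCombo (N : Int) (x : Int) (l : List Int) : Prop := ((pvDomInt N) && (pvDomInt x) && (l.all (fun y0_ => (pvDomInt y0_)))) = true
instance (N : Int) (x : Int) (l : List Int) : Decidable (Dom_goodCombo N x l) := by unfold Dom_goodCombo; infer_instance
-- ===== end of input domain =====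

-- B builds an inverted index (value -> positions) over l[:N-1] once and queries it per digit
-- of x, instead of A's rescan of all positions for every digit; objective: alternative.

-- ===== PORT A =====
-- while x > 0: digits.append(x % 10); x = x // 10   (fuel x.toNat is a totality guard only:
-- x//10 strictly decreases while x > 0, so the fuel never runs out before the loop exits)
def pvDigitsAuxA : Nat → Int → List Int
  | 0, _ => []
  | f + 1, x => if 0 < x then PySem.Int.mod x 10 :: pvDigitsAuxA f (PySem.Int.floordiv x 10) else []

def pvDigitsA (x : Int) : List Int := pvDigitsAuxA x.toNat x

-- the nested for-loops with early 'return False': A is True iff no (d, position) violation is found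
def goodCombo (N : Int) (x : Int) (l : List Int) : Bool :=
  let digits := pvDigitsA x
  !(digits.any (fun d =>
      (PySem.List.pyRange 0 (N - 1) 1).any (fun i =>
        d == PySem.List.pyGetD l i 0 && !(digits.contains (i + 1)))))

-- ===== PORT B =====
-- while x > 0: ds.add(x % 10); x //= 10   (same fuel guard)
def pvDigitSetAuxB : Nat → Int → PySem.Set Int → PySem.Set Int
  | 0, _, s => s
  | f + 1, x, s => if 0 < x then pvDigitSetAuxB f (PySem.Int.floordiv x 10) (PySem.Set.add s (PySem.Int.mod x 10)) else s

def pvDigitSetB (x : Int) (s : PySem.Set Int) : PySem.Set Int := pvDigitSetAuxB x.toNat x s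

-- for i in range(N-1): idx.setdefault(l[i], []).append(i)
def pvIndexB (N : Int) (l : List Int) : PySem.Dict Int (List Int) :=
  (PySem.List.pyRange 0 (N - 1) 1).foldl
    (fun d i => d.modify (PySem.List.pyGetD l i 0) [] (· ++ [i])) PySem.Dict.empty

-- if not ds: return True; then per digit d look d's positions up and check each successor
def goodCombo_alt (N : Int) (x : Int) (l : List Int) : Bool :=
  let ds := pvDigitSetB x PySem.Set.empty
  if ds.isEmpty then true
  else
    let idx := pvIndexB N l
    !(ds.any (fun dg =>
        (idx.getD dg []).any (fun i => !(PySem.Set.contains ds (i + 1)))))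

-- ===== PRECONDITION & SPEC =====
-- Pre_ restricts to the natural domain where all N-1 inspected positions exist (or x has no digits,
-- so neither program touches l); outside it both Pythons can raise IndexError, though A may still
-- return False when an early violation precedes the out-of-range index — those inputs are excluded too.
def Pre_goodCombo (N : Int) (x : Int) (l : List Int) : Prop := x ≤ 0 ∨ N ≤ (l.length : Int) + 1
instance (N : Int) (x : Int) (l : List Int) : Decidable (Pre_goodCombo N x l) := by unfold Pre_goodCombo; infer_instance
def pvWitness_goodCombo : Int × Int × List Int := (3, 12, [1, 2, 0])

def Spec_goodCombo (N : Int) (x : Int) (l : List Int) (out : Bool) : Prop := out = goodCombo_alt N x l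
instance (N : Int) (x : Int) (l : List Int) (out : Bool) : Decidable (Spec_goodCombo N x l out) := by unfold Spec_goodCombo; infer_instance

-- ===== CLAIM (what is proved, stated in full; the proofs are below) =====
def Claim_equal_goodCombo : Prop := ∀ (N : Int) (x : Int) (l : List Int), Dom_goodCombo N x l → Pre_goodCombo N x l → Spec_goodCombo N x l (goodCombo N x l)

-- ===== LEMMAS AND PROOFS =====

-- at equal fuel, B's digit-set accumulator holds exactly s's elements plus A's digit list's elements
theorem mem_pvDigitSetAuxB (f : Nat) (x : Int) (s : PySem.Set Int) (v : Int) :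
    v ∈ pvDigitSetAuxB f x s ↔ v ∈ s ∨ v ∈ pvDigitsAuxA f x := by
  induction f generalizing x s with
  | zero => simp [pvDigitSetAuxB, pvDigitsAuxA]
  | succ f ih =>
      by_cases h : 0 < x
      · simp only [pvDigitSetAuxB, pvDigitsAuxA, if_pos h, ih, PySem.Set.mem_add, List.mem_cons]
        tauto
      · simp [pvDigitSetAuxB, pvDigitsAuxA, if_neg h]

theorem mem_pvDigitSetB (x : Int) (s : PySem.Set Int) (v : Int) :
    v ∈ pvDigitSetB x s ↔ v ∈ s ∨ v ∈ pvDigitsA x :=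
  mem_pvDigitSetAuxB x.toNat x s v

-- the inverted index's entry for c is exactly the positions of c in the scanned range
theorem getD_pvIndexB (N : Int) (l : List Int) (c : Int) :
    (pvIndexB N l).getD c [] =
      (PySem.List.pyRange 0 (N - 1) 1).filter (fun i => PySem.List.pyGetD l i 0 == c) := by
  unfold pvIndexB
  have h1 := List.foldl_map (f := fun i : Int => (PySem.List.pyGetD l i 0, i))
    (g := fun (d : PySem.Dict Int (List Int)) (p : Int × Int) => d.modify p.1 [] (· ++ [p.2]))
    (l := PySem.List.pyRange 0 (N - 1) 1) (init := PySem.Dict.empty)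
  rw [← h1, PySem.Dict.getD_foldl_modify_append, PySem.Dict.getD_empty, List.filter_map]
  simp [Function.comp_def]

theorem goodCombo_eq (N : Int) (x : Int) (l : List Int) :
    goodCombo N x l = goodCombo_alt N x l := by
  rw [Bool.eq_iff_iff]
  simp only [goodCombo, goodCombo_alt, Bool.not_eq_true', List.any_eq_false]
  by_cases he : (pvDigitSetB x PySem.Set.empty).isEmpty
  · simp only [he, if_pos, iff_true]
    have hnil : pvDigitsA x = [] := by
      rw [List.eq_nil_iff_forall_not_mem]
      intro v hv
      have := (mem_pvDigitSetB x PySem.Set.empty v).mpr (Or.inr hv)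
      rw [List.isEmpty_iff] at he
      rw [he] at this
      exact List.not_mem_nil this
    simp [hnil]
  · rw [if_neg he]
    have hmem : ∀ v, v ∈ pvDigitSetB x PySem.Set.empty ↔ v ∈ pvDigitsA x := by
      intro v
      rw [mem_pvDigitSetB]
      simp [PySem.Set.empty]
    simp only [List.any_eq_false, List.any_eq_true, not_exists, getD_pvIndexB,
      List.mem_filter, Bool.and_eq_true, beq_iff_eq, List.contains_eq_mem,
      decide_eq_false_iff_not, not_and, PySem.Set.contains,
      Bool.not_eq_eq_eq_not, Bool.not_true, hmem]
    constructor
    · intro h dg hdg i hi hn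
      exact h dg hdg i hi.1 hi.2.symm hn
    · intro h d hd i hi hdl hn
      exact h d hd i ⟨hi, hdl.symm⟩ hn

-- ===== VERDICT (by name: the statement is the Claim_ definition above) =====
theorem goodCombo_spec : Claim_equal_goodCombo := by
  intro N x l _ _
  exact goodCombo_eq N x l
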